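-- pv_equiv track=rewrite | github.com/VHollund/AoC2020 | Day11/main.py | check_l
-- ===== SOURCE A (Python) =====
-- def check_l(l, y, x): #returns true if lane is open
--     if x == 0:
--         return True
--     for z in range(x-1, -1, -1):
--         if l[z] == "#":
--             return False
--         if l[z] == "L":
--             return True
--     return True
-- ===== SOURCE B (Python) =====
-- def check_l(l, y, x):
--     if x <= 0:
--         return True
--     seats = [c for c in l[:x] if c in ("#", "L")]
--     return not seats or seats[-1] == "L"
-- ===== Notes on version B (the rewrite author's own statement) =====
-- stated objective: simpler
-- what changed: Replaces the index-countdown scan with early returns by slicing the left prefix, filtering it to seats ('#'/'L') in one comprehension, and inspecting only the last filtered element.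
import Mathlib
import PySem

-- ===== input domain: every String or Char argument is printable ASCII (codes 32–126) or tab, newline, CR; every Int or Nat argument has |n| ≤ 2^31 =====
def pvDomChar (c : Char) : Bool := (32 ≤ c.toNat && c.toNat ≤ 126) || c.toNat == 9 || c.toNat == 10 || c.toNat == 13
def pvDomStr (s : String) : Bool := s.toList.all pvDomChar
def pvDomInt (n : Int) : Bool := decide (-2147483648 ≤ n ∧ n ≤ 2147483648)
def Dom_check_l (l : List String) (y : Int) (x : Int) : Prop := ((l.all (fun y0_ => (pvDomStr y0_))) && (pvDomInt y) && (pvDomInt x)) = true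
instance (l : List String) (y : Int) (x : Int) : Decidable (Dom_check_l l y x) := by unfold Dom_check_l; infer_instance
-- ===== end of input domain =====

-- B replaces A's countdown scan with filter-the-prefix + look at the last seat; objective: simpler.

-- ===== PORT A =====
-- the 'for z in range(x-1, -1, -1)' loop; 'none' from pyGet? is IndexError (excluded by Pre_), value there is arbitrary
def checkLoopA (l : List String) : List Int → Bool
  | [] => true
  | z :: rest =>
    match PySem.List.pyGet? l z with
    | none => true
    | some s => if s = "#" then false else if s = "L" then true else checkLoopA l rest

def check_l (l : List String) (y : Int) (x : Int) : Bool :=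
  if x = 0 then true
  else checkLoopA l (PySem.List.pyRange (x - 1) (-1) (-1))

-- ===== PORT B =====
def check_l_alt (l : List String) (y : Int) (x : Int) : Bool :=
  if x ≤ 0 then true
  else
    let seats := (PySem.List.slice l none (some x)).filter (fun c => c == "#" || c == "L")
    -- 'not seats or seats[-1] == "L"': seats[-1] via pyGet?; none exactly when seats is empty
    match PySem.List.pyGet? seats (-1) with
    | none => true
    | some s => s == "L"

-- ===== PRECONDITION & SPEC =====
-- Pre_ excludes exactly x > len(l), where A's l[z] raises IndexError on its first access
def Pre_check_l (l : List String) (y : Int) (x : Int) : Prop := x ≤ (l.length : Int)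
instance (l : List String) (y : Int) (x : Int) : Decidable (Pre_check_l l y x) := by unfold Pre_check_l; infer_instance
def pvWitness_check_l : List String × Int × Int := (["L", ".", "#"], 0, 2)

def Spec_check_l (l : List String) (y : Int) (x : Int) (out : Bool) : Prop := out = check_l_alt l y x
instance (l : List String) (y : Int) (x : Int) (out : Bool) : Decidable (Spec_check_l l y x out) := by unfold Spec_check_l; infer_instance

-- ===== CLAIM (what is proved, stated in full; the proofs are below) =====
def Claim_equal_check_l : Prop := ∀ (l : List String) (y : Int) (x : Int), Dom_check_l l y x → Pre_check_l l y x → Spec_check_l l y x (check_l l y x)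

-- ===== LEMMAS AND PROOFS =====

-- B's verdict read off the filtered prefix
def altVerdict (p : List String) : Bool :=
  match (p.filter (fun c => c == "#" || c == "L")).getLast? with
  | none => true
  | some s => s == "L"

lemma loop_eq (l : List String) : ∀ n : Nat, n ≤ l.length →
    checkLoopA l (PySem.List.pyRange ((n : Int) - 1) (-1) (-1)) = altVerdict (l.take n) := by
  intro n
  induction n with
  | zero =>
    intro _
    rw [PySem.List.pyRange_neg_one_eq_nil (by omega)]
    simp [checkLoopA, altVerdict]
  | succ m ih =>
    intro h
    have hm : m < l.length := by omega
    have hc : ((m + 1 : Nat) : Int) - 1 = (m : Int) := by push_cast; ring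
    rw [hc, PySem.List.pyRange_neg_one_cons (by omega)]
    have hget : PySem.List.pyGet? l (m : Int) = some l[m] := by
      rw [PySem.List.pyGet?_natCast]; simp [hm]
    have hcm : ((m : Int) - 1) = ((m : Nat) : Int) - 1 := by norm_num
    have htake : l.take (m + 1) = l.take m ++ [l[m]] := by
      rw [List.take_add_one]; simp [hm]
    unfold checkLoopA
    rw [hget]
    simp only [altVerdict, htake, List.filter_append]
    by_cases h1 : l[m] = "#"
    · simp [h1]
    · by_cases h2 : l[m] = "L"
      · simp [h2]
      · have : (List.filter (fun c => c == "#" || c == "L") [l[m]]) = [] := by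
          simp [h1, h2]
        rw [this, List.append_nil]
        simp only [h1, h2, if_false]
        exact ih (by omega)

-- ===== VERDICT (by name: the statement is the Claim_ definition above) =====
theorem check_l_spec : Claim_equal_check_l := by
  intro l y x _ hpre
  unfold Spec_check_l check_l check_l_alt
  by_cases hx : x ≤ 0
  · rcases eq_or_lt_of_le hx with he | hlt
    · simp [he]
    · rw [if_neg (by omega), if_pos hx, PySem.List.pyRange_neg_one_eq_nil (by omega)]
      simp [checkLoopA]
  · rw [not_le] at hx
    rw [if_neg (by omega), if_neg (by omega)]
    obtain ⟨n, rfl⟩ : ∃ n : Nat, x = (n : Int) := ⟨x.toNat, (Int.toNat_of_nonneg (by omega)).symm⟩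
    unfold Pre_check_l at hpre
    have hn : n ≤ l.length := by exact_mod_cast hpre
    rw [loop_eq l n hn, PySem.List.slice_to_natCast]
    simp [altVerdict, PySem.List.pyGet?_neg_one]
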